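-- pv_equiv track=rewrite | github.com/wyd010616/HIT-NLP | 实验1-B-1190201303-王艺丹/cal_PRF.py | trans_s
-- ===== SOURCE A (Python) =====
-- def trans_s(lines):
--     total = []
--     for line in lines:
--         if line == '\n':
--             continue
--         region = []
--         start = 0
--         line = line[:len(line) - 1].split()
--         for w in line:
--             head, tail = w.split('/')
--             if head[0] == '[':
--                 end = start + len(head) - 1
--                 region.append((start,end))
--                 start = end
--                 continue
--             end = start + len(head)
--             region.append((start,end))
--             start = end
--         if len(region) > 0:
--             total.append(region)
--     return total
-- ===== SOURCE B (Python) =====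
-- def trans_s(lines):
--     total = []
--     for line in lines:
--         if line == '\n':
--             continue
--         heads = []
--         for w in line[:-1].split():
--             h, t = w.split('/')
--             heads.append(h)
--         deltas = [len(h) - 1 if h[0] == '[' else len(h) for h in heads]
--         cum = [0]
--         for d in deltas:
--             cum.append(cum[-1] + d)
--         region = list(zip(cum, cum[1:]))
--         if region:
--             total.append(region)
--     return total
-- ===== Notes on version B (the rewrite author's own statement) =====
-- stated objective: alternative
-- what changed: A threads a running (region, start) state machine through the word loop; B instead collects the per-word head widths, turns them into prefix sums with a second pass, and zips consecutive prefix sums into the region pairs.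
import Mathlib
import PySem

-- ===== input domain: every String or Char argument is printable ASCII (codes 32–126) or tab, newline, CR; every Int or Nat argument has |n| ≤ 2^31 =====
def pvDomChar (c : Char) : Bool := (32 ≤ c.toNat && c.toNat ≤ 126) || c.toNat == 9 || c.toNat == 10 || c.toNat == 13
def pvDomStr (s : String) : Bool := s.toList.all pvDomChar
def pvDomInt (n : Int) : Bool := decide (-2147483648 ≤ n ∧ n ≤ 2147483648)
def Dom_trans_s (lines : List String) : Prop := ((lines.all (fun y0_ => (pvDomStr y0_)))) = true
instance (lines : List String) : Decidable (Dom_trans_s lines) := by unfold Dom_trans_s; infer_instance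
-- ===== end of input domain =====

-- B replaces A's running (region, start) state machine by per-word widths, a prefix-sum pass and a
-- zip of consecutive prefix sums (alternative decomposition, same cost, same exceptions).

-- ===== PORT A =====
-- A's inner word loop, state (region, start); the two fall-through branches are where Python
-- raises (ValueError on unpacking, IndexError on head[0]) — those inputs are excluded by Pre_.
def transSLineA (ws : List String) : List (Int × Int) × Int :=
  ws.foldl (fun st w =>
    match PySem.Str.split? w "/" with
    | some [head, _tail] =>
      match PySem.Str.pyGet? head 0 with
      | some c =>
        if c = '[' then
          let e := st.2 + PySem.Str.len head - 1
          (st.1 ++ [(st.2, e)], e)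
        else
          let e := st.2 + PySem.Str.len head
          (st.1 ++ [(st.2, e)], e)
      | none => st
    | _ => st) ([], 0)

def trans_s (lines : List String) : List (List (Int × Int)) :=
  lines.foldl (fun total line =>
    if line = "\n" then total
    else
      let ws := PySem.Str.split₀ (PySem.Str.slice line none (some (PySem.Str.len line - 1)))
      let region := (transSLineA ws).1
      if region.length > 0 then total ++ [region] else total) []

-- ===== PORT B =====
def trans_s_alt (lines : List String) : List (List (Int × Int)) :=
  lines.foldl (fun total line =>
    if line = "\n" then total
    else
      let heads := (PySem.Str.split₀ (PySem.Str.slice line none (some (-1)))).map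
        (fun w => match PySem.Str.split? w "/" with
          | some [h, _t] => h
          | _ => "")  -- Python raises ValueError here (unpacking); excluded by Pre_
      let deltas := heads.map (fun h =>
        match PySem.Str.pyGet? h 0 with
        | some c => if c = '[' then PySem.Str.len h - 1 else PySem.Str.len h
        | none => 0)  -- Python raises IndexError here; excluded by Pre_
      let cum := deltas.foldl (fun cum d => cum ++ [PySem.List.pyGetD cum (-1) 0 + d]) [0]
      let region := cum.zip (PySem.List.slice cum (some 1) none)
      if region ≠ [] then total ++ [region] else total) []

-- ===== PRECONDITION & SPEC =====
-- a word is well-formed when w.split('/') has exactly two parts and the part before '/' is non-empty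
def WordOK (w : String) : Prop :=
  ((PySem.Str.split? w "/").getD []).length = 2 ∧
  PySem.Str.len (((PySem.Str.split? w "/").getD []).headD "") ≠ 0

-- Pre_ excludes exactly the inputs on which A (and B) raise: a word without exactly one '/'
-- (ValueError on unpacking) or a word whose head is empty (IndexError on head[0]).
def Pre_trans_s (lines : List String) : Prop :=
  ∀ line ∈ lines, line ≠ "\n" →
    ∀ w ∈ PySem.Str.split₀ (PySem.Str.slice line none (some (PySem.Str.len line - 1))),
      WordOK w

instance (lines : List String) : Decidable (Pre_trans_s lines) := by
  unfold Pre_trans_s WordOK; infer_instance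

def pvWitness_trans_s : List String := ["ab/c [xy/t u/v\n", "\n", "q/r\n"]

def Spec_trans_s (lines : List String) (out : List (List (Int × Int))) : Prop := out = trans_s_alt lines
instance (lines : List String) (out : List (List (Int × Int))) : Decidable (Spec_trans_s lines out) := by unfold Spec_trans_s; infer_instance

-- ===== CLAIM (what is proved, stated in full; the proofs are below) =====
def Claim_equal_trans_s : Prop := ∀ (lines : List String), Dom_trans_s lines → Pre_trans_s lines → Spec_trans_s lines (trans_s lines)

-- ===== LEMMAS AND PROOFS =====

-- the head of w.split('/') and the per-word width, as B computes them
def pvHead (w : String) : String := ((PySem.Str.split? w "/").getD []).headD ""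
def pvDelta (h : String) : Int :=
  match PySem.Str.pyGet? h 0 with
  | some c => if c = '[' then PySem.Str.len h - 1 else PySem.Str.len h
  | none => 0

-- prefix sums of the widths, starting (exclusively) from s
def pvSums (s : Int) : List Int → List Int
  | [] => []
  | d :: ds => (s + d) :: pvSums (s + d) ds

lemma pyGetD_append_singleton_neg_one (c : List Int) (a : Int) :
    PySem.List.pyGetD (c ++ [a]) (-1) 0 = a := by
  simp [PySem.List.pyGetD, PySem.List.pyGet?, PySem.List.pyIdx?]

lemma cum_foldl (ds : List Int) (c : List Int) (a : Int) :
    ds.foldl (fun cum d => cum ++ [PySem.List.pyGetD cum (-1) 0 + d]) (c ++ [a])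
      = (c ++ [a]) ++ pvSums a ds := by
  induction ds generalizing c a with
  | nil => simp [pvSums]
  | cons d ds ih =>
    simp only [List.foldl_cons, pyGetD_append_singleton_neg_one, pvSums]
    have h := ih (c ++ [a]) (a + d)
    simpa using h

lemma step_eq (w : String) (hw : WordOK w) (st : List (Int × Int) × Int) :
    (match PySem.Str.split? w "/" with
     | some [head, _tail] =>
       match PySem.Str.pyGet? head 0 with
       | some c =>
         if c = '[' then
           let e := st.2 + PySem.Str.len head - 1
           (st.1 ++ [(st.2, e)], e)
         else
           let e := st.2 + PySem.Str.len head
           (st.1 ++ [(st.2, e)], e)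
       | none => st
     | _ => st)
    = (st.1 ++ [(st.2, st.2 + pvDelta (pvHead w))], st.2 + pvDelta (pvHead w)) := by
  obtain ⟨hlen, hhead⟩ := hw
  cases hsp : PySem.Str.split? w "/" with
  | none => rw [hsp] at hlen; simp at hlen
  | some l =>
    rw [hsp] at hlen hhead
    match l, hlen with
    | [h, t], _ =>
      have hhd : pvHead w = h := by simp [pvHead, hsp]
      have hne : h.toList ≠ [] := by
        intro hcon
        apply hhead
        simp [PySem.Str.len_eq, hcon]
      dsimp only
      cases hg : PySem.Str.pyGet? h 0 with
      | none =>
        exfalso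
        rw [show (0 : Int) = ((0 : Nat) : Int) by norm_num, PySem.Str.pyGet?_natCast] at hg
        cases hl : h.toList with
        | nil => exact hne hl
        | cons x xs => rw [hl] at hg; simp at hg
      | some c =>
        dsimp only
        have hd : pvDelta h = if c = '[' then PySem.Str.len h - 1 else PySem.Str.len h := by
          unfold pvDelta
          rw [hg]
        rw [hhd, hd]
        by_cases hc : c = '[' <;> simp [hc, Int.add_sub_assoc]

lemma aFold_eq (ws : List String) (hP : ∀ w ∈ ws, WordOK w) (r : List (Int × Int)) (s : Int) :
    ws.foldl (fun st w =>
      match PySem.Str.split? w "/" with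
      | some [head, _tail] =>
        match PySem.Str.pyGet? head 0 with
        | some c =>
          if c = '[' then
            let e := st.2 + PySem.Str.len head - 1
            (st.1 ++ [(st.2, e)], e)
          else
            let e := st.2 + PySem.Str.len head
            (st.1 ++ [(st.2, e)], e)
        | none => st
      | _ => st) (r, s)
    = (r ++ (s :: pvSums s (ws.map (fun w => pvDelta (pvHead w)))).zip
              (pvSums s (ws.map (fun w => pvDelta (pvHead w)))),
       s + (ws.map (fun w => pvDelta (pvHead w))).sum) := by
  induction ws generalizing r s with
  | nil => simp [pvSums]
  | cons w ws ih =>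
    rw [List.foldl_cons, step_eq w (hP w (List.mem_cons_self)) (r, s)]
    rw [ih (fun w hw => hP w (List.mem_cons_of_mem _ hw))]
    simp only [List.map_cons, pvSums, List.sum_cons, List.zip_cons_cons, List.append_assoc,
      List.cons_append, List.nil_append, Prod.mk.injEq]
    constructor
    · trivial
    · ring

lemma slice_len_sub_one (s : String) :
    PySem.Str.slice s none (some (PySem.Str.len s - 1))
      = PySem.Str.slice s none (some (-1)) := by
  apply String.toList_inj.mp
  rw [PySem.Str.toList_slice, PySem.Str.toList_slice]
  simp only [PySem.Chars.slice_eq_listSlice, PySem.List.slice_to_neg_one, PySem.Str.len_eq]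
  cases hl : s.toList with
  | nil => simp [PySem.List.slice_to_neg_one]
  | cons x t =>
    have h1 : ((x :: t).length : Int) - 1 = ((t.length : Nat) : Int) := by simp
    rw [h1, PySem.List.slice_to_natCast]
    simp [List.dropLast_eq_take]

lemma line_regions_eq (ws : List String) (hP : ∀ w ∈ ws, WordOK w) :
    (transSLineA ws).1
      = ((ws.map (fun w => pvDelta (pvHead w))).foldl
          (fun cum d => cum ++ [PySem.List.pyGetD cum (-1) 0 + d]) [0]).zip
        (PySem.List.slice ((ws.map (fun w => pvDelta (pvHead w))).foldl
          (fun cum d => cum ++ [PySem.List.pyGetD cum (-1) 0 + d]) [0]) (some 1) none) := by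
  have hc := cum_foldl (ws.map (fun w => pvDelta (pvHead w))) [] 0
  simp only [List.nil_append] at hc
  rw [hc, PySem.List.slice_from_one]
  unfold transSLineA
  rw [aFold_eq ws hP [] 0]
  simp

-- B's head projection agrees with pvHead on well-formed words
lemma heads_eq (ws : List String) (hP : ∀ w ∈ ws, WordOK w) :
    ws.map (fun w => match PySem.Str.split? w "/" with
      | some [h, _t] => h
      | _ => "")
    = ws.map pvHead := by
  apply List.map_congr_left
  intro w hw
  obtain ⟨hlen, _⟩ := hP w hw
  cases hsp : PySem.Str.split? w "/" with
  | none => rw [hsp] at hlen; simp at hlen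
  | some l =>
    rw [hsp] at hlen
    match l, hlen with
    | [h, t], _ => simp [pvHead, hsp]

-- B's per-line body equals A's per-line body on a well-formed line
lemma line_eq (line : String)
    (hws : ∀ w ∈ PySem.Str.split₀ (PySem.Str.slice line none (some (PySem.Str.len line - 1))),
      WordOK w)
    (acc : List (List (Int × Int))) :
    (let ws := PySem.Str.split₀ (PySem.Str.slice line none (some (PySem.Str.len line - 1)))
     let region := (transSLineA ws).1
     if region.length > 0 then acc ++ [region] else acc)
    = (let heads := (PySem.Str.split₀ (PySem.Str.slice line none (some (-1)))).map
         (fun w => match PySem.Str.split? w "/" with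
           | some [h, _t] => h
           | _ => "")
       let deltas := heads.map (fun h =>
         match PySem.Str.pyGet? h 0 with
         | some c => if c = '[' then PySem.Str.len h - 1 else PySem.Str.len h
         | none => 0)
       let cum := deltas.foldl (fun cum d => cum ++ [PySem.List.pyGetD cum (-1) 0 + d]) [0]
       let region := cum.zip (PySem.List.slice cum (some 1) none)
       if region ≠ [] then acc ++ [region] else acc) := by
  rw [slice_len_sub_one] at hws
  simp only [slice_len_sub_one, heads_eq _ hws, List.map_map]
  have hmaps :
      (PySem.Str.split₀ (PySem.Str.slice line none (some (-1)))).map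
        ((fun h =>
          match PySem.Str.pyGet? h 0 with
          | some c => if c = '[' then PySem.Str.len h - 1 else PySem.Str.len h
          | none => 0) ∘ pvHead)
      = (PySem.Str.split₀ (PySem.Str.slice line none (some (-1)))).map
          (fun w => pvDelta (pvHead w)) := rfl
  rw [hmaps, ← line_regions_eq _ hws]
  rcases h : (transSLineA (PySem.Str.split₀ (PySem.Str.slice line none (some (-1))))).1 with _ | _
  · simp
  · simp

set_option maxHeartbeats 1000000 in
lemma fold_eq (lines : List String)
    (hP : ∀ line ∈ lines, line ≠ "\n" →
      ∀ w ∈ PySem.Str.split₀ (PySem.Str.slice line none (some (PySem.Str.len line - 1))), WordOK w)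
    (acc : List (List (Int × Int))) :
    lines.foldl (fun total line =>
      if line = "\n" then total
      else
        let ws := PySem.Str.split₀ (PySem.Str.slice line none (some (PySem.Str.len line - 1)))
        let region := (transSLineA ws).1
        if region.length > 0 then total ++ [region] else total) acc
    = lines.foldl (fun total line =>
      if line = "\n" then total
      else
        let heads := (PySem.Str.split₀ (PySem.Str.slice line none (some (-1)))).map
          (fun w => match PySem.Str.split? w "/" with
            | some [h, _t] => h
            | _ => "")
        let deltas := heads.map (fun h =>
          match PySem.Str.pyGet? h 0 with
          | some c => if c = '[' then PySem.Str.len h - 1 else PySem.Str.len h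
          | none => 0)
        let cum := deltas.foldl (fun cum d => cum ++ [PySem.List.pyGetD cum (-1) 0 + d]) [0]
        let region := cum.zip (PySem.List.slice cum (some 1) none)
        if region ≠ [] then total ++ [region] else total) acc := by
  induction lines generalizing acc with
  | nil => rw [List.foldl_nil, List.foldl_nil]
  | cons line lines ih =>
    rw [List.foldl_cons, List.foldl_cons]
    by_cases hnl : line = "\n"
    · rw [if_pos hnl, if_pos hnl]
      exact ih (fun l hl => hP l (List.mem_cons_of_mem _ hl)) acc
    · rw [if_neg hnl, if_neg hnl, line_eq line (hP line (List.mem_cons_self) hnl) acc]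
      exact ih (fun l hl => hP l (List.mem_cons_of_mem _ hl)) _

-- ===== VERDICT (by name: the statement is the Claim_ definition above) =====
theorem trans_s_spec : Claim_equal_trans_s := by
  intro lines _ hpre
  unfold Spec_trans_s trans_s trans_s_alt
  exact fold_eq lines hpre []
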